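-- pv_equiv track=rewrite | github.com/derekfalconer-dev/batting-lineup-optimizer | core/roster_reconciliation.py | choose_display_last
-- ===== SOURCE A (Python) =====
-- from typing import Any, Iterable, Mapping, Sequence
--
-- def choose_display_last(group: Sequence[Mapping[str, Any]]) -> str:
--     candidates = [
--         str(item.get("last", "")).strip()
--         for item in group
--         if str(item.get("last", "")).strip()
--     ]
--     if not candidates:
--         return ""
--     candidates.sort(key=lambda x: (len(x), x.lower()), reverse=True)
--     return candidates[0]
-- ===== SOURCE B (Python) =====
-- def choose_display_last(group):
--     best = None
--     for item in group:
--         name = str(item.get("last", "")).strip()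
--         if not name:
--             continue
--         if best is None or (len(name), name.lower()) > (len(best), best.lower()):
--             best = name
--     return best if best is not None else ""
-- ===== Notes on version B (the rewrite author's own statement) =====
-- stated objective: alternative
-- what changed: Replaced building a candidate list and sorting it by the composite key (len, lower) reverse with a single running-max pass over the group that keeps the first candidate beating the current best under Python's tuple comparison.
import Mathlib
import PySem

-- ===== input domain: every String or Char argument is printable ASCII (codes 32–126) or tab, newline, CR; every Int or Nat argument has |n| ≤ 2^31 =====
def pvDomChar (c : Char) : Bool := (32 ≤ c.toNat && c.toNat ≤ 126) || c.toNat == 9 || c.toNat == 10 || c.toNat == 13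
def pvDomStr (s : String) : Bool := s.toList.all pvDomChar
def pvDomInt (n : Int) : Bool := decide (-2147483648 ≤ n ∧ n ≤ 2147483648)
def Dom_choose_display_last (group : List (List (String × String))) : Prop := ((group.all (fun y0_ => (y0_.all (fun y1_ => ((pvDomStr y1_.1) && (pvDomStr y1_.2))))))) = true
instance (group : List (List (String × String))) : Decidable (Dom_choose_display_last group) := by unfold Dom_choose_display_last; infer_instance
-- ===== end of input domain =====

-- B replaces A's filter-then-composite-key-sort by a single running-max pass over the group
-- (no intermediate list, no sort); equivalence of the return values is proved below.


-- shared by both ports: str(item.get("last", "")).strip()  (str() is the identity on str)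
def pvStripLast (item : List (String × String)) : String :=
  PySem.Str.strip (PySem.Dict.getD ⟨item⟩ "last" "")

-- ===== PORT A =====
-- the comprehension: [pvStripLast(item) for item in group if pvStripLast(item)]
def pvCandidates (group : List (List (String × String))) : List String :=
  (group.map (fun item => pvStripLast item)).filter (fun s => s.toList != [])

def choose_display_last (group : List (List (String × String))) : String :=
  if pvCandidates group = [] then ""
  else
    (PySem.List.sorted2 (pvCandidates group)
      (fun x => PySem.Str.len x) (fun x => PySem.Str.lower x) true).headD ""

-- ===== PORT B =====
-- Python's tuple comparison (len(name), name.lower()) > (len(best), best.lower())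
def pvBetter (m s : String) : Bool :=
  decide (PySem.Str.len m < PySem.Str.len s ∨
          (PySem.Str.len m = PySem.Str.len s ∧ PySem.Str.lower m < PySem.Str.lower s))

-- the loop's update: 'if best is None or (...tuple >...): best = name'
def pvStep (best : Option String) (name : String) : Option String :=
  match best with
  | none => some name
  | some m => if pvBetter m name then some name else some m

def choose_display_last_alt (group : List (List (String × String))) : String :=
  (group.foldl (fun best item =>
      let name := pvStripLast item
      if name.toList = [] then best else pvStep best name) none
  ).getD ""

-- ===== PRECONDITION & SPEC =====
def Spec_choose_display_last (group : List (List (String × String))) (out : String) : Prop := out = choose_display_last_alt group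
instance (group : List (List (String × String))) (out : String) : Decidable (Spec_choose_display_last group out) := by unfold Spec_choose_display_last; infer_instance

-- ===== CLAIM (what is proved, stated in full; the proofs are below) =====
def Claim_equal_choose_display_last : Prop := ∀ (group : List (List (String × String))), Dom_choose_display_last group → Spec_choose_display_last group (choose_display_last group)

-- ===== LEMMAS AND PROOFS =====

-- sorted2's composite strict order, as a named comparison
def pvLtA (a b : String) : Bool :=
  decide (PySem.Str.len a < PySem.Str.len b) ||
    (!decide (PySem.Str.len b < PySem.Str.len a) && decide (PySem.Str.lower a < PySem.Str.lower b))

-- Python's strict tuple comparison, written with equality, equals the not-less formulation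
theorem pv_tuple_gt {k1 k2 : Type} [LT k1] [LT k2] [DecidableLT k1] [DecidableLT k2] [DecidableEq k1]
    (a b : k1) (c d : k2)
    (tri : a < b ∨ a = b ∨ b < a) (asym : ¬(a < b ∧ b < a)) (irr : ∀ x : k1, ¬ x < x) :
    decide (a < b ∨ (a = b ∧ c < d)) = (decide (a < b) || (!decide (b < a) && decide (c < d))) := by
  rcases tri with h | h | h
  · have h2 : ¬ b < a := fun hb => asym ⟨h, hb⟩
    simp [h, h2]
  · subst h
    have h2 := irr a
    simp [h2]
  · have h2 : ¬ a < b := fun hb => asym ⟨hb, h⟩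
    have h3 : a ≠ b := fun he => (irr a) (he ▸ h)
    simp [h, h2, h3]

-- B's tuple comparison is exactly sorted2's composite strict order
theorem pvBetter_eq (m s : String) : pvBetter m s = pvLtA m s := by
  unfold pvBetter pvLtA
  apply pv_tuple_gt
  · omega
  · omega
  · intro x; omega

-- head of insertBy with the reversed comparison: the incoming element wins iff it strictly beats the old head
theorem pv_insertBy_head? {α : Type} (lt : α → α → Bool) (x : α) (acc : List α) :
    (PySem.List.insertBy (fun a b => lt b a) x acc).head? =
      some (match acc.head? with | none => x | some h => if lt h x then x else h) := by
  cases acc with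
  | nil => rfl
  | cons h t =>
    simp only [PySem.List.insertBy, List.head?_cons]
    split <;> simp

-- head of the reverse insertion-sort fold is the running strict max (first occurrence wins)
theorem pv_foldl_insertBy_head? {α : Type} (lt : α → α → Bool) (xs : List α) (acc : List α) (b : α)
    (h : acc.head? = some b) :
    (xs.foldl (fun acc x => PySem.List.insertBy (fun a b => lt b a) x acc) acc).head? =
      some (xs.foldl (fun m x => if lt m x then x else m) b) := by
  induction xs generalizing acc b with
  | nil => simpa using h
  | cons x t ih =>
    simp only [List.foldl_cons]
    apply ih
    rw [pv_insertBy_head?, h]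

theorem pv_headD_of_head? {α : Type} (l : List α) (v d : α) (h : l.head? = some v) :
    l.headD d = v := by
  cases l <;> simp_all

-- the Option-accumulator running max equals the plain running max once seeded
theorem pv_foldl_opt (t : List String) (b : String) :
    t.foldl pvStep (some b) = some (t.foldl (fun m s => if pvBetter m s then s else m) b) := by
  induction t generalizing b with
  | nil => rfl
  | cons s t ih =>
    simp only [List.foldl_cons, pvStep]
    by_cases h : pvBetter b s = true <;> simp [h, ih]

-- B's group-level fold with the emptiness skip equals a fold over A's candidate list
theorem pv_fold_group (group : List (List (String × String))) (b : Option String) :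
    group.foldl (fun best item =>
        let name := pvStripLast item
        if name.toList = [] then best else pvStep best name) b
      = (pvCandidates group).foldl pvStep b := by
  induction group generalizing b with
  | nil => rfl
  | cons i g ih =>
    by_cases h : (pvStripLast i).toList = []
    · have h2 : ((pvStripLast i).toList != []) = false := by simp [h]
      simp only [pvCandidates, List.foldl_cons, List.map_cons, List.filter_cons, h2,
        Bool.false_eq_true, if_false, if_pos h]
      exact ih b
    · have h2 : ((pvStripLast i).toList != []) = true := by simp [h]
      simp only [pvCandidates, List.foldl_cons, List.map_cons, List.filter_cons, h2,
        if_true, if_neg h]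
      exact ih _

-- ===== VERDICT (by name: the statement is the Claim_ definition above) =====
theorem choose_display_last_spec : Claim_equal_choose_display_last := by
  intro group _
  unfold Spec_choose_display_last choose_display_last choose_display_last_alt
  rw [pv_fold_group]
  cases hcand : pvCandidates group with
  | nil => simp
  | cons c t =>
    rw [if_neg (List.cons_ne_nil c t)]
    have hB : (c :: t).foldl pvStep none
        = some (t.foldl (fun m s => if pvBetter m s then s else m) c) := by
      rw [List.foldl_cons]
      exact pv_foldl_opt t c
    rw [hB, Option.getD_some]
    have hA := pv_foldl_insertBy_head? (lt := pvLtA) (xs := t) (acc := [c]) (b := c) rfl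
    have hsorted :
        PySem.List.sorted2 (c :: t) (fun x => PySem.Str.len x) (fun x => PySem.Str.lower x) true =
          t.foldl (fun acc x => PySem.List.insertBy (fun a b => pvLtA b a) x acc) [c] := rfl
    rw [hsorted, pv_headD_of_head? _ _ _ hA]
    apply PySem.List.foldl_congr_mem
    intro acc x hx
    rw [pvBetter_eq]
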